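-- pv_equiv track=rewrite | github.com/MassiPozzuto/IP | Python/Parciales-Viejos/2C-2024.py | subsecuencia_mas_larga
-- ===== SOURCE A (Python) =====
-- def subsecuencia_mas_larga(v: list[int]) -> tuple[int,int]:
--     subsecuencia_mas_larga: list[int] = [0]
--     subsecuencia_actual: list[int] = [0]
--
--     for i in range(len(v) - 1):
--         if v[i + 1] != v[i] + 1 :
--             if len(subsecuencia_actual) > len(subsecuencia_mas_larga):
--                 subsecuencia_mas_larga = subsecuencia_actual.copy()
--             subsecuencia_actual = []
--         subsecuencia_actual.append(i + 1)
--
--     if len(subsecuencia_actual) > len(subsecuencia_mas_larga): # La subsecuencia mas larga esta en el final de la lista pasada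
--         subsecuencia_mas_larga = subsecuencia_actual.copy()
--
--     return (len(subsecuencia_mas_larga), subsecuencia_mas_larga[0])
-- ===== SOURCE B (Python) =====
-- def subsecuencia_mas_larga(v: list[int]) -> tuple[int, int]:
--     n = len(v)
--     cortes = [i for i in range(1, n) if v[i] != v[i - 1] + 1]
--     tramos = [(b - a, a) for a, b in zip([0] + cortes, cortes + [n])]
--     return max([(1, 0)] + tramos, key=lambda t: t[0])
-- ===== Notes on version B (the rewrite author's own statement) =====
-- stated objective: alternative
-- what changed: B replaces A's streaming scan (maintaining and copying the current-run and best-run index lists) by a staged pipeline: it first materializes the list of break positions with a comprehension, pairs consecutive boundaries via zip into (length, start) segments, and picks the answer with the library max(key=len) over [(1,0)] + segments, which also covers empty and single-element input.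
import Mathlib
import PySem

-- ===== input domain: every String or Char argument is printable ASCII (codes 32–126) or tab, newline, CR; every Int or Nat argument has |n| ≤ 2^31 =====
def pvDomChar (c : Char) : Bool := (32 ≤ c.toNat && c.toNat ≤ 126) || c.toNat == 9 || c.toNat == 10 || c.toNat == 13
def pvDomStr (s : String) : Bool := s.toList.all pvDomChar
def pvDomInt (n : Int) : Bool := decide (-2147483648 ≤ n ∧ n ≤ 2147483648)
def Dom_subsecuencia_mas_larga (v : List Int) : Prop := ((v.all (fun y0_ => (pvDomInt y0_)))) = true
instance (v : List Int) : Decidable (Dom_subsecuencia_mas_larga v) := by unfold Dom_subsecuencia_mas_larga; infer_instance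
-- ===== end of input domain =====

-- B replaces A's streaming best/current-run scan by a staged pipeline:
-- break positions by comprehension, zip of boundaries into (length, start)
-- segments, then library max by length; objective: alternative decomposition.

-- ===== PORT A =====
-- one iteration of A's for-loop over i in range(len(v)-1); state = (subsecuencia_mas_larga, subsecuencia_actual)
def pvAStep (v : List Int) (st : List Int × List Int) (i : Int) : List Int × List Int :=
  if PySem.List.pyGetD v (i + 1) 0 ≠ PySem.List.pyGetD v i 0 + 1 then
    -- best updated (copy), actual reset to [] then i+1 appended
    ((if st.2.length > st.1.length then st.2 else st.1), [i + 1])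
  else (st.1, st.2 ++ [i + 1])

-- indices i, i+1 produced by range(len(v)-1) are always in range, so pyGetD = v[i];
-- likewise best[0] at the end: best is always nonempty, so pyGetD = best[0]
def subsecuencia_mas_larga (v : List Int) : Int × Int :=
  let st := (PySem.List.pyRange 0 ((v.length : Int) - 1) 1).foldl (pvAStep v) ([0], [0])
  let best := if st.2.length > st.1.length then st.2 else st.1
  ((best.length : Int), PySem.List.pyGetD best 0 0)

-- ===== PORT B =====
-- indices i, i-1 in the comprehension are always in range, so pyGetD = v[i]
def subsecuencia_mas_larga_alt (v : List Int) : Int × Int :=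
  let n : Int := (v.length : Int)
  let cortes : List Int := (PySem.List.pyRange 1 n 1).filter
    (fun i => PySem.List.pyGetD v i 0 != PySem.List.pyGetD v (i - 1) 0 + 1)
  let tramos : List (Int × Int) :=
    List.zipWith (fun a b => (b - a, a)) ((0 : Int) :: cortes) (cortes ++ [n])
  -- Python max(xs, key=…) = PySem.List.maxD; the list is nonempty (literal head), so the default is never used
  PySem.List.maxD (((1 : Int), (0 : Int)) :: tramos) (fun t => t.1) (1, 0)

-- ===== PRECONDITION & SPEC =====
def Spec_subsecuencia_mas_larga (v : List Int) (out : Int × Int) : Prop := out = subsecuencia_mas_larga_alt v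
instance (v : List Int) (out : Int × Int) : Decidable (Spec_subsecuencia_mas_larga v out) := by unfold Spec_subsecuencia_mas_larga; infer_instance

-- ===== CLAIM =====
def Claim_equal_subsecuencia_mas_larga : Prop := ∀ (v : List Int), Dom_subsecuencia_mas_larga v → Spec_subsecuencia_mas_larga v (subsecuencia_mas_larga v)

-- ===== LEMMAS AND PROOFS =====

-- Python's max(key) loop step: keep the first maximal element
def pvStep (acc t : Int × Int) : Int × Int := if acc.1 < t.1 then t else acc

def pvMaxRun (rs : List (Int × Int)) : Int × Int := rs.foldl pvStep (1, 0)

-- break positions among 1..k-1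
def pvCuts (v : List Int) (k : Int) : List Int :=
  (PySem.List.pyRange 1 k 1).filter
    (fun i => PySem.List.pyGetD v i 0 != PySem.List.pyGetD v (i - 1) 0 + 1)

-- completed segments determined by the cut list
def pvComp (cs : List Int) : List (Int × Int) :=
  List.zipWith (fun a b => (b - a, a)) ((0 : Int) :: cs) cs

lemma pv_max?_cons (t : List (Int × Int)) (a : Int × Int) :
    PySem.List.max? (a :: t) (fun x => x.1) = some (t.foldl pvStep a) := by
  induction t generalizing a with
  | nil => rfl
  | cons h t ih =>
    simp only [PySem.List.max?, List.foldl_cons] at ih ⊢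
    rw [← apply_ite some (a.1 < h.1) h a]
    exact ih (pvStep a h)

lemma pv_maxD_cons (a : Int × Int) (t : List (Int × Int)) (d : Int × Int) :
    PySem.List.maxD (a :: t) (fun x => x.1) d = t.foldl pvStep a := by
  simp only [PySem.List.maxD, pv_max?_cons, Option.getD_some]

lemma pv_zip_snoc (cs : List Int) (a c : Int) :
    List.zipWith (fun a b => (b - a, a)) (a :: cs) (cs ++ [c])
      = List.zipWith (fun a b => (b - a, a)) (a :: cs) cs
        ++ [(c - cs.getLastD a, cs.getLastD a)] := by
  induction cs generalizing a with
  | nil => simp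
  | cons d cs ih =>
    simp only [List.cons_append, List.zipWith_cons_cons, ih d, List.getLastD_cons]

lemma pv_zip_trunc (xs ys : List Int) (c : Int) (h : ys.length ≤ xs.length) :
    List.zipWith (fun a b => ((b - a : Int), a)) (xs ++ [c]) ys
      = List.zipWith (fun a b => (b - a, a)) xs ys := by
  induction xs generalizing ys with
  | nil =>
    cases ys with
    | nil => simp
    | cons y ys => simp at h
  | cons x xs ih =>
    cases ys with
    | nil => simp
    | cons y ys =>
      simp only [List.cons_append, List.zipWith_cons_cons, List.cons.injEq, true_and]
      exact ih ys (by simpa using h)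

lemma pv_comp_snoc (cs : List Int) (c : Int) :
    pvComp (cs ++ [c]) = pvComp cs ++ [(c - cs.getLastD 0, cs.getLastD 0)] := by
  unfold pvComp
  rw [show ((0 : Int) :: (cs ++ [c])) = ((0 : Int) :: cs) ++ [c] from rfl,
    pv_zip_trunc _ _ _ (by simp), pv_zip_snoc]

lemma pv_getLastD_snoc (cs : List Int) (c a : Int) : (cs ++ [c]).getLastD a = c := by
  simp

lemma pv_cuts_le (v : List Int) (k : Nat) :
    0 ≤ (pvCuts v ((k : Int) + 1)).getLastD 0 ∧ (pvCuts v ((k : Int) + 1)).getLastD 0 ≤ (k : Int) := by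
  cases hcs : pvCuts v ((k : Int) + 1) with
  | nil => simp
  | cons d cs =>
    have hmem : (d :: cs).getLastD 0 ∈ d :: cs := by
      rw [List.getLastD_eq_getLast?,
        List.getLast?_eq_some_getLast (l := d :: cs) (by simp)]
      simp [List.getLast_mem]
    have : (d :: cs).getLastD 0 ∈ pvCuts v ((k : Int) + 1) := hcs ▸ hmem
    have h2 : (d :: cs).getLastD 0 ∈ PySem.List.pyRange 1 ((k : Int) + 1) 1 :=
      List.mem_of_mem_filter this
    rw [PySem.List.mem_pyRange_one] at h2
    constructor <;> omega

-- loop invariant: after k iterations, A's current run is the index range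
-- [s, k] with s the last cut (or 0), and A's best list has exactly the
-- length and head of the running max over the completed segments.
lemma pv_inv (v : List Int) (k : Nat) :
    ((PySem.List.pyRange 0 (k : Int) 1).foldl (pvAStep v) ([0], [0])).2
      = PySem.List.pyRange ((pvCuts v ((k : Int) + 1)).getLastD 0) ((k : Int) + 1) 1 ∧
    ((((PySem.List.pyRange 0 (k : Int) 1).foldl (pvAStep v) ([0], [0])).1.length : Int),
      PySem.List.pyGetD ((PySem.List.pyRange 0 (k : Int) 1).foldl (pvAStep v) ([0], [0])).1 0 0)
      = pvMaxRun (pvComp (pvCuts v ((k : Int) + 1))) := by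
  induction k with
  | zero =>
    have h1 : PySem.List.pyRange 0 ((0 : Nat) : Int) 1 = [] :=
      PySem.List.pyRange_one_eq_nil (by norm_num)
    have h2 : pvCuts v (((0 : Nat) : Int) + 1) = [] := by
      unfold pvCuts
      rw [show (((0 : Nat) : Int) + 1) = 1 by norm_num,
        PySem.List.pyRange_one_eq_nil (by norm_num)]
      rfl
    rw [h1, h2]
    have h3 : PySem.List.pyRange 0 1 1 = [0] := by
      simpa using PySem.List.pyRange_one_singleton (a := (0 : Int))
    constructor
    · simpa [List.foldl_nil] using h3.symm
    · simp [pvMaxRun, pvComp, PySem.List.pyGetD, PySem.List.pyGet?, PySem.List.pyIdx?]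
  | succ k ih =>
    obtain ⟨hact, hbest⟩ := ih
    obtain ⟨hs0, hsk⟩ := pv_cuts_le v k
    set s := (pvCuts v ((k : Int) + 1)).getLastD 0 with hsdef
    have hA : PySem.List.pyRange 0 ((k : Int) + 1) 1
        = PySem.List.pyRange 0 (k : Int) 1 ++ [(k : Int)] :=
      PySem.List.pyRange_one_succ_right (by positivity)
    have hCuts : pvCuts v ((k : Int) + 1 + 1)
        = pvCuts v ((k : Int) + 1)
          ++ (if PySem.List.pyGetD v ((k : Int) + 1) 0
                ≠ PySem.List.pyGetD v (k : Int) 0 + 1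
              then [(k : Int) + 1] else []) := by
      unfold pvCuts
      rw [PySem.List.pyRange_one_succ_right (show (1 : Int) ≤ (k : Int) + 1 by omega),
        List.filter_append]
      congr 1
      by_cases hp : PySem.List.pyGetD v ((k : Int) + 1) 0
          = PySem.List.pyGetD v (k : Int) 0 + 1
      · rw [if_neg (by simpa using hp)]
        simp only [List.filter_cons, List.filter_nil]
        rw [if_neg (by simp [show (k : Int) + 1 - 1 = (k : Int) by ring, hp])]
      · rw [if_pos (by simpa using hp)]
        simp only [List.filter_cons, List.filter_nil]
        rw [if_pos (by simp [show (k : Int) + 1 - 1 = (k : Int) by ring]; simpa using hp)]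
    simp only [Nat.cast_add, Nat.cast_one] at *
    rw [hA, List.foldl_append, List.foldl_cons, List.foldl_nil]
    set sA := (PySem.List.pyRange 0 (k : Int) 1).foldl (pvAStep v) ([0], [0]) with hsAdef
    have hlenA : (sA.2.length : Int) = (k : Int) + 1 - s := by
      rw [hact, PySem.List.length_pyRange_one]; omega
    by_cases hp : PySem.List.pyGetD v ((k : Int) + 1) 0
        = PySem.List.pyGetD v (k : Int) 0 + 1
    · -- run continues: no new cut
      have hAc : pvAStep v sA (k : Int) = (sA.1, sA.2 ++ [(k : Int) + 1]) := by
        simp only [pvAStep]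
        rw [if_neg (fun h => h hp)]
      rw [hCuts, if_neg (fun h => h hp), List.append_nil]
      refine ⟨?_, ?_⟩ <;> simp only [hAc]
      · show sA.2 ++ [(k : Int) + 1] = _
        rw [hact, ← PySem.List.pyRange_one_succ_right (show s ≤ (k : Int) + 1 by omega)]
      · exact hbest
    · -- run breaks: new cut at k+1
      have hAc : pvAStep v sA (k : Int)
          = ((if sA.2.length > sA.1.length then sA.2 else sA.1), [(k : Int) + 1]) := by
        simp only [pvAStep]
        rw [if_pos hp]
      rw [hCuts, if_pos hp]
      have hlast : (pvCuts v ((k : Int) + 1) ++ [(k : Int) + 1]).getLastD 0 = (k : Int) + 1 :=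
        pv_getLastD_snoc _ _ _
      have hcomp : pvComp (pvCuts v ((k : Int) + 1) ++ [(k : Int) + 1])
          = pvComp (pvCuts v ((k : Int) + 1)) ++ [((k : Int) + 1 - s, s)] :=
        pv_comp_snoc _ _
      refine ⟨?_, ?_⟩ <;> simp only [hAc, hlast, hcomp]
      · show [(k : Int) + 1] = _
        rw [show (k : Int) + 1 + 1 = ((k : Int) + 1) + 1 by ring,
          PySem.List.pyRange_one_singleton]
      · rw [pvMaxRun, List.foldl_append, ← pvMaxRun]
        simp only [List.foldl_cons, List.foldl_nil]
        rw [show pvStep (pvMaxRun (pvComp (pvCuts v ((k : Int) + 1)))) ((k : Int) + 1 - s, s)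
            = if (pvMaxRun (pvComp (pvCuts v ((k : Int) + 1)))).1 < (k : Int) + 1 - s
              then ((k : Int) + 1 - s, s)
              else pvMaxRun (pvComp (pvCuts v ((k : Int) + 1))) from rfl]
        rcases lt_or_ge sA.1.length sA.2.length with h | h
        · rw [if_pos h, if_pos (by rw [← hbest]; push_cast; omega)]
          have hlt : s < (k : Int) + 1 := by omega
          rw [hact, Prod.mk.injEq]
          refine ⟨by rw [PySem.List.length_pyRange_one]; omega, ?_⟩
          rw [PySem.List.pyRange_one_cons hlt]
          simp [PySem.List.pyGetD, PySem.List.pyGet?, PySem.List.pyIdx?]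
        · rw [if_neg (by omega), if_neg (by rw [← hbest]; push_cast; omega)]
          exact hbest

-- ===== VERDICT (by name: the statement is the Claim_ definition above) =====
theorem subsecuencia_mas_larga_spec : Claim_equal_subsecuencia_mas_larga := by
  intro v _
  unfold Spec_subsecuencia_mas_larga
  cases hn : v.length with
  | zero =>
    have hv : v = [] := List.eq_nil_of_length_eq_zero hn
    subst hv; decide
  | succ m =>
    obtain ⟨hact, hbest⟩ := pv_inv v m
    obtain ⟨hs0, hsk⟩ := pv_cuts_le v m
    set s := (pvCuts v ((m : Int) + 1)).getLastD 0 with hsdef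
    unfold subsecuencia_mas_larga subsecuencia_mas_larga_alt
    simp only [hn]
    have hmcast : ((m + 1 : Nat) : Int) - 1 = (m : Int) := by push_cast; ring
    have hm1 : ((m + 1 : Nat) : Int) = (m : Int) + 1 := by push_cast; ring
    rw [hmcast, hm1]
    set sA := (PySem.List.pyRange 0 (m : Int) 1).foldl (pvAStep v) ([0], [0]) with hsAdef
    have hcortes : (PySem.List.pyRange 1 ((m : Int) + 1) 1).filter
        (fun i => PySem.List.pyGetD v i 0 != PySem.List.pyGetD v (i - 1) 0 + 1)
        = pvCuts v ((m : Int) + 1) := rfl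
    rw [hcortes, pv_maxD_cons, pv_zip_snoc, ← hsdef, ← pvComp,
      List.foldl_append, ← pvMaxRun]
    simp only [List.foldl_cons, List.foldl_nil]
    rw [show pvStep (pvMaxRun (pvComp (pvCuts v ((m : Int) + 1)))) ((m : Int) + 1 - s, s)
        = if (pvMaxRun (pvComp (pvCuts v ((m : Int) + 1)))).1 < (m : Int) + 1 - s
          then ((m : Int) + 1 - s, s)
          else pvMaxRun (pvComp (pvCuts v ((m : Int) + 1))) from rfl]
    have hlenA : (sA.2.length : Int) = (m : Int) + 1 - s := by
      rw [hact, PySem.List.length_pyRange_one]; omega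
    rcases lt_or_ge sA.1.length sA.2.length with h | h
    · rw [if_pos h, if_pos (by rw [← hbest]; push_cast; omega)]
      have hlt : s < (m : Int) + 1 := by omega
      rw [hact, Prod.mk.injEq]
      refine ⟨by rw [PySem.List.length_pyRange_one]; omega, ?_⟩
      rw [PySem.List.pyRange_one_cons hlt]
      simp [PySem.List.pyGetD, PySem.List.pyGet?, PySem.List.pyIdx?]
    · rw [if_neg (by omega), if_neg (by rw [← hbest]; push_cast; omega)]
      exact hbest
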